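-- pv_equiv track=rewrite | github.com/andrmayo/perseus-citation-model | scripts/check_data_leakage.py | check_exact_duplicates
-- ===== SOURCE A (Python) =====
-- from collections import defaultdict
-- from typing import Dict, List, Set, Tuple
--
-- def check_exact_duplicates(
--     splits: Dict[str, List[Tuple[str, str, int]]]
-- ) -> Dict[Tuple[str, str], List[str]]:
--     """
--     Check for exact duplicate xml_contexts across splits.
--
--     Returns:
--         Dict mapping (split1, split2) -> list of duplicate contexts
--     """
--     # Build index: context -> list of (split_name, source_filename, line_num)
--     context_index = defaultdict(list)
--
--     for split_name, contexts in splits.items():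
--         for xml_context, source_file, line_num in contexts:
--             context_index[xml_context].append((split_name, source_file, line_num))
--
--     # Find contexts that appear in multiple splits
--     cross_split_duplicates = defaultdict(list)
--
--     for xml_context, occurrences in context_index.items():
--         splits_with_context = set(occ[0] for occ in occurrences)
--         if len(splits_with_context) > 1:
--             # This context appears in multiple splits
--             for i, (split1, _, _) in enumerate(occurrences):
--                 for split2, _, _ in occurrences[i+1:]:
--                     if split1 != split2:
--                         key = tuple(sorted([split1, split2]))
--                         cross_split_duplicates[key].append(xml_context)
--
--     return cross_split_duplicates
-- ===== SOURCE B (Python) =====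
-- def check_exact_duplicates(splits):
--     """
--     Check for exact duplicate xml_contexts across splits.
--
--     Returns:
--         Dict mapping (split1, split2) -> list of duplicate contexts
--     """
--     # context -> per-split occurrence counts (split first-seen order preserved)
--     ctx_counts = {}
--     for split_name, contexts in splits.items():
--         for xml_context, _source_file, _line_num in contexts:
--             counts = ctx_counts.setdefault(xml_context, {})
--             counts[split_name] = counts.get(split_name, 0) + 1
--
--     cross_split_duplicates = {}
--     for xml_context, counts in ctx_counts.items():
--         rest = list(counts.items())
--         while rest:
--             (s1, c1), rest = rest[0], rest[1:]
--             for s2, c2 in rest: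
--                 key = (s1, s2) if s1 <= s2 else (s2, s1)
--                 cross_split_duplicates.setdefault(key, []).extend([xml_context] * (c1 * c2))
--     return cross_split_duplicates
-- ===== Notes on version B (the rewrite author's own statement) =====
-- stated objective: faster
-- what changed: Instead of enumerating all O(k^2) occurrence pairs of each duplicated context, B groups each context's occurrences into per-split counts (one dict pass) and emits each split pair once with multiplicity count1*count2, appending the context that many times.
import Mathlib
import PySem

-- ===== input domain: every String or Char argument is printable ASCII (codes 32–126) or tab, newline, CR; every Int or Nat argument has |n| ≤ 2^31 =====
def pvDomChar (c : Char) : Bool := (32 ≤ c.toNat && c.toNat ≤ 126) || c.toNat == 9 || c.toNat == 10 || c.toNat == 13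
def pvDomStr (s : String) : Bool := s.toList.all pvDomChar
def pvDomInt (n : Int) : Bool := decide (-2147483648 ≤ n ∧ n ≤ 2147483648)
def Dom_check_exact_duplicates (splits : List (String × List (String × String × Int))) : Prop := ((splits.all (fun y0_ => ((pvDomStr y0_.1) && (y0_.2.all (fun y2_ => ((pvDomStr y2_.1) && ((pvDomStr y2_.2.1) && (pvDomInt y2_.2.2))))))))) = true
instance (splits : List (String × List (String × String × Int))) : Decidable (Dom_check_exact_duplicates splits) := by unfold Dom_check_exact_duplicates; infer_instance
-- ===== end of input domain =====

-- ===== PORT A =====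
-- B re-implements the quadratic per-context pair enumeration by per-split occurrence
-- counts (objective: faster; return-value equivalence proved below).

-- tuple(sorted([split1, split2]))
def pvSortedPair (s1 s2 : String) : String × String :=
  match PySem.List.sorted [s1, s2] (fun x => x) false with
  | [x, y] => (x, y)
  | _ => (s1, s2)   -- unreachable: sorted of a two-element list has two elements

def check_exact_duplicates (splits : List (String × List (String × String × Int))) : List (String × String × List String) :=
  -- context_index[xml_context].append((split_name, source_file, line_num))
  let contextIndex : PySem.Dict String (List (String × String × Int)) :=
    splits.foldl (fun d p =>
      p.2.foldl (fun d t => d.modify t.1 [] (· ++ [(p.1, t.2.1, t.2.2)])) d) PySem.Dict.empty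
  let cross : PySem.Dict (String × String) (List String) :=
    contextIndex.items.foldl (fun out ci =>
      let occurrences := ci.2
      let splitsWithContext : PySem.Set String := PySem.Set.ofList (occurrences.map (·.1))
      if 1 < PySem.Set.len splitsWithContext then
        (PySem.List.enumerate occurrences).foldl (fun out io =>
          (PySem.List.slice occurrences (some (io.1 + 1)) none).foldl (fun out o2 =>
            if io.2.1 ≠ o2.1 then
              out.modify (pvSortedPair io.2.1 o2.1) [] (· ++ [ci.1])
            else out) out) out
      else out) PySem.Dict.empty
  cross.items.map (fun kv => (kv.1.1, kv.1.2, kv.2))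

-- ===== PORT B =====
-- key = (s1, s2) if s1 <= s2 else (s2, s1)
def pvKey (s1 s2 : String) : String × String := if s1 ≤ s2 then (s1, s2) else (s2, s1)

-- the 'while rest' loop of B, recursing on the remaining (split, count) pairs
def pvPairLoop (ctx : String) :
    PySem.Dict (String × String) (List String) → List (String × Int) →
      PySem.Dict (String × String) (List String)
  | out, [] => out
  | out, (s1, c1) :: rest =>
      pvPairLoop ctx
        (rest.foldl (fun out q =>
          out.modify (pvKey s1 q.1) [] (· ++ List.replicate (c1 * q.2).toNat ctx)) out)
        rest

def check_exact_duplicates_alt (splits : List (String × List (String × String × Int))) : List (String × String × List String) :=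
  -- ctx_counts: context -> {split -> count}; 'counts = d.setdefault(ctx, {}); counts[s] = counts.get(s, 0) + 1'
  -- mutates the inner dict in place, i.e. net effect 'modify ctx empty (inner-modify s)'
  let ctxCounts : PySem.Dict String (PySem.Dict String Int) :=
    splits.foldl (fun d p =>
      p.2.foldl (fun d t =>
        d.modify t.1 PySem.Dict.empty (fun c => c.modify p.1 0 (· + 1))) d) PySem.Dict.empty
  let cross : PySem.Dict (String × String) (List String) :=
    ctxCounts.items.foldl (fun out ci => pvPairLoop ci.1 out ci.2.items) PySem.Dict.empty
  cross.items.map (fun kv => (kv.1.1, kv.1.2, kv.2))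

-- ===== PRECONDITION & SPEC =====
def Spec_check_exact_duplicates (splits : List (String × List (String × String × Int))) (out : List (String × String × List String)) : Prop := out = check_exact_duplicates_alt splits
instance (splits : List (String × List (String × String × Int))) (out : List (String × String × List String)) : Decidable (Spec_check_exact_duplicates splits out) := by unfold Spec_check_exact_duplicates; infer_instance

-- ===== CLAIM (what is proved, stated in full; the proofs are below) =====
def Claim_equal_check_exact_duplicates : Prop := ∀ (splits : List (String × List (String × String × Int))), Dom_check_exact_duplicates splits → Spec_check_exact_duplicates splits (check_exact_duplicates splits)

-- ===== LEMMAS AND PROOFS =====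

-- basic facts about the key function
theorem pvSortedPair_eq_pvKey (a b : String) : pvSortedPair a b = pvKey a b := by
  have h : PySem.List.sorted [a, b] (fun x => x) false = if a ≤ b then [a, b] else [b, a] := by
    simp only [PySem.List.sorted_eq_foldl_insertBy, List.foldl, PySem.List.insertBy]
    rcases lt_or_ge b a with h | h
    · simp [h, not_le.mpr h]
    · simp [not_lt.mpr h, h]
  unfold pvSortedPair pvKey
  rw [h]
  split_ifs <;> rfl

theorem pvKey_comm (a b : String) : pvKey a b = pvKey b a := by
  unfold pvKey
  rcases eq_or_ne a b with rfl | hne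
  · simp
  · rcases le_total a b with h | h
    · simp [h, not_le.mpr (lt_of_le_of_ne h hne)]
    · simp [h, not_le.mpr (lt_of_le_of_ne h (Ne.symm hne))]

theorem pvKey_cases (a b : String) : pvKey a b = (a, b) ∨ pvKey a b = (b, a) := by
  unfold pvKey; split_ifs <;> simp

theorem pvKey_inj {a b c d : String} (h : pvKey a b = pvKey c d) :
    (a = c ∧ b = d) ∨ (a = d ∧ b = c) := by
  unfold pvKey at h
  split_ifs at h with h1 h2 h2 <;> simp only [Prod.mk.injEq] at h <;> tauto

-- first occurrences, kept in order
def pvFirsts {α : Type} [DecidableEq α] : List α → List α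
  | [] => []
  | x :: xs => x :: (pvFirsts xs).filter (fun y => y ≠ x)

theorem mem_pvFirsts {α : Type} [DecidableEq α] {q : α} {l : List α} :
    q ∈ pvFirsts l ↔ q ∈ l := by
  induction l with
  | nil => simp [pvFirsts]
  | cons x xs ih =>
    simp only [pvFirsts, List.mem_cons, List.mem_filter, ih, decide_eq_true_eq]
    constructor
    · rintro (rfl | ⟨h, _⟩) <;> tauto
    · rintro (rfl | h)
      · tauto
      · rcases eq_or_ne q x with rfl | hne <;> tauto

theorem nodup_pvFirsts {α : Type} [DecidableEq α] (l : List α) : (pvFirsts l).Nodup := by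
  induction l with
  | nil => simp [pvFirsts]
  | cons x xs ih =>
    simp only [pvFirsts, List.nodup_cons]
    refine ⟨fun hmem => ?_, ih.filter _⟩
    simp [List.mem_filter] at hmem

theorem pvFirsts_append {α : Type} [DecidableEq α] (u v : List α) :
    pvFirsts (u ++ v) = pvFirsts u ++ (pvFirsts v).filter (fun y => y ∉ u) := by
  induction u with
  | nil => simp [pvFirsts]
  | cons x u' ih =>
    simp only [List.cons_append, pvFirsts, ih, List.filter_append, List.cons.injEq, true_and,
      List.filter_filter]
    congr 1
    apply List.filter_congr
    intro y _
    simp only [List.mem_cons, decide_eq_true_eq, Bool.and_eq_true, decide_not]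
    by_cases h1 : y = x <;> by_cases h2 : y ∈ u' <;> simp [h1, h2]

theorem pvFirsts_filter {α : Type} [DecidableEq α] (p : α → Bool) (l : List α) :
    pvFirsts (l.filter p) = (pvFirsts l).filter p := by
  induction l with
  | nil => simp [pvFirsts]
  | cons x xs ih =>
    by_cases hx : p x
    · rw [List.filter_cons_of_pos hx]
      show x :: (pvFirsts (xs.filter p)).filter _ = (x :: (pvFirsts xs).filter _).filter p
      rw [List.filter_cons_of_pos hx, ih, List.filter_filter, List.filter_filter]
      congr 1
      apply List.filter_congr
      intro y _
      by_cases h1 : y = x <;> simp [h1, hx]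
    · rw [List.filter_cons_of_neg hx]
      show pvFirsts (xs.filter p) = (x :: (pvFirsts xs).filter _).filter p
      rw [List.filter_cons_of_neg hx, ih, List.filter_filter]
      apply List.filter_congr
      intro y _
      by_cases h1 : y = x
      · subst h1; simp [hx]
      · simp [h1]

theorem pvFirsts_map {α β : Type} [DecidableEq α] [DecidableEq β] (f : α → β) (l : List α)
    (hinj : ∀ a ∈ l, ∀ b ∈ l, f a = f b → a = b) :
    pvFirsts (l.map f) = (pvFirsts l).map f := by
  induction l with
  | nil => simp [pvFirsts]
  | cons x xs ih =>
    have hinj' : ∀ a ∈ xs, ∀ b ∈ xs, f a = f b → a = b := by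
      intro a ha b hb
      exact hinj a (by simp [ha]) b (by simp [hb])
    simp only [List.map_cons, pvFirsts, ih hinj', List.cons.injEq, true_and]
    rw [List.filter_map]
    congr 1
    apply List.filter_congr
    intro y hy
    have hyx : y ∈ xs := mem_pvFirsts.mp hy
    simp only [Function.comp_apply, decide_eq_true_eq, decide_not]
    by_cases h : y = x
    · simp [h]
    · simp only [h, decide_false, Bool.not_false, Bool.not_eq_true', decide_eq_false_iff_not]
      intro hfe
      exact h (hinj y (by simp [hyx]) x (by simp) hfe)

theorem pvFoldlAdd {α : Type} [DecidableEq α] [BEq α] [LawfulBEq α] (l : List α)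
    (s : PySem.Set α) :
    l.foldl PySem.Set.add s = s ++ (pvFirsts l).filter (fun y => y ∉ s) := by
  induction l generalizing s with
  | nil => simp [pvFirsts]
  | cons x xs ih =>
    simp only [List.foldl_cons, ih, pvFirsts, List.filter_cons, List.filter_filter]
    by_cases hx : x ∈ s
    · have : PySem.Set.add s x = s := by
        show (if s.contains x then s else s ++ [x]) = s
        rw [if_pos ((PySem.Set.contains_iff s x).mpr hx)]
      rw [this]
      simp only [hx, decide_true, Bool.not_true, if_false]
      congr 1
      apply List.filter_congr
      intro y _
      by_cases h1 : y = x <;> by_cases h2 : y ∈ s <;> simp [h1, h2] <;> subst h1 <;> simp [hx]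
    · have : PySem.Set.add s x = s ++ [x] := by
        show (if s.contains x then s else s ++ [x]) = s ++ [x]
        rw [if_neg (fun hc => hx ((PySem.Set.contains_iff s x).mp hc))]
      rw [this]
      simp only [hx, decide_false, Bool.not_false, if_true, List.append_assoc,
        List.singleton_append]
      congr 1
      congr 1
      apply List.filter_congr
      intro y _
      by_cases h1 : y = x <;> by_cases h2 : y ∈ s <;> simp [h1, h2] <;> subst h1 <;> simp [hx]

theorem pvFirsts_eq_ofList (l : List String) : pvFirsts l = PySem.Set.ofList l := by
  rw [PySem.Set.ofList_eq_foldl, pvFoldlAdd]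
  simp

-- the per-context key sequence generated by A's double loop
def pvPairsA : List String → List (String × String)
  | [] => []
  | x :: xs => ((xs.filter (fun y => x ≠ y)).map (fun y => pvKey x y)) ++ pvPairsA xs

-- all unordered pairs of a (deduplicated) split list
def pvPairsK : List String → List (String × String)
  | [] => []
  | x :: xs => xs.map (fun y => pvKey x y) ++ pvPairsK xs

theorem mem_pvPairsA {q : String × String} {l : List String} (h : q ∈ pvPairsA l) :
    ∃ a b, a ∈ l ∧ b ∈ l ∧ a ≠ b ∧ q = pvKey a b := by
  induction l with
  | nil => simp [pvPairsA] at h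
  | cons x xs ih =>
    simp only [pvPairsA, List.mem_append, List.mem_map, List.mem_filter] at h
    rcases h with ⟨y, ⟨hy, hxy⟩, rfl⟩ | h
    · exact ⟨x, y, by simp, by simp [hy], by simpa using hxy, rfl⟩
    · obtain ⟨a, b, ha, hb, hab, rfl⟩ := ih h
      exact ⟨a, b, by simp [ha], by simp [hb], hab, rfl⟩

theorem mem_pvPairsK {q : String × String} {l : List String} (hnd : l.Nodup) (h : q ∈ pvPairsK l) :
    ∃ a b, a ∈ l ∧ b ∈ l ∧ a ≠ b ∧ q = pvKey a b := by
  induction l with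
  | nil => simp [pvPairsK] at h
  | cons x xs ih =>
    simp only [List.nodup_cons] at hnd
    simp only [pvPairsK, List.mem_append, List.mem_map] at h
    rcases h with ⟨y, hy, rfl⟩ | h
    · exact ⟨x, y, by simp, by simp [hy], fun hxy => hnd.1 (hxy ▸ hy), rfl⟩
    · obtain ⟨a, b, ha, hb, hab, rfl⟩ := ih hnd.2 h
      exact ⟨a, b, by simp [ha], by simp [hb], hab, rfl⟩

theorem count_map_pvKey (x : String) (xs : List String) {a b : String} (hab : a ≠ b) :
    ((xs.filter (fun y => x ≠ y)).map (fun y => pvKey x y)).count (pvKey a b) =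
      if x = a then xs.count b else if x = b then xs.count a else 0 := by
  rw [List.count_eq_countP, List.countP_map, List.countP_filter]
  by_cases h1 : x = a
  · subst h1
    rw [if_pos rfl, List.count_eq_countP]
    apply List.countP_congr
    intro y _
    simp only [Function.comp_apply, Bool.and_eq_true, beq_iff_eq, decide_eq_true_eq]
    constructor
    · rintro ⟨hk, _⟩
      rcases pvKey_inj hk with ⟨_, rfl⟩ | ⟨h3, h4⟩
      · rfl
      · exact absurd h3.symm (Ne.symm hab)
    · rintro rfl
      exact ⟨rfl, fun h => hab h⟩
  · rw [if_neg h1]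
    by_cases h2 : x = b
    · subst h2
      rw [if_pos rfl, List.count_eq_countP]
      apply List.countP_congr
      intro y _
      simp only [Function.comp_apply, Bool.and_eq_true, beq_iff_eq, decide_eq_true_eq]
      constructor
      · rintro ⟨hk, _⟩
        rcases pvKey_inj hk with ⟨rfl, _⟩ | ⟨_, rfl⟩
        · exact absurd rfl hab
        · rfl
      · rintro rfl
        exact ⟨pvKey_comm _ _, fun h => hab h.symm⟩
    · rw [if_neg h2]
      rw [show (0 : Nat) = List.countP (fun _ => false) xs by simp]
      apply List.countP_congr
      intro y _
      simp only [Function.comp_apply, Bool.and_eq_true, beq_iff_eq, decide_eq_true_eq]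
      constructor
      · rintro ⟨hk, _⟩
        rcases pvKey_inj hk with ⟨h3, _⟩ | ⟨h4, _⟩
        · exact absurd h3 h1
        · exact absurd h4 h2
      · simp

theorem count_pvPairsA (l : List String) {a b : String} (hab : a ≠ b) :
    (pvPairsA l).count (pvKey a b) = l.count a * l.count b := by
  induction l with
  | nil => simp [pvPairsA]
  | cons x xs ih =>
    rw [pvPairsA, List.count_append, ih, count_map_pvKey x xs hab]
    by_cases h1 : x = a
    · subst h1
      rw [if_pos rfl, List.count_cons_self, List.count_cons_of_ne hab]
      ring
    · rw [if_neg h1, List.count_cons_of_ne (fun h : x = a => h1 h)]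
      by_cases h2 : x = b
      · subst h2
        rw [if_pos rfl, List.count_cons_self]
        ring
      · rw [if_neg h2, List.count_cons_of_ne (fun h : x = b => h2 h)]
        ring

theorem pvPairsK_filter (x : String) (S : List String) :
    pvPairsK (S.filter (fun y => y ≠ x)) =
      (pvPairsK S).filter (fun q => q.1 ≠ x ∧ q.2 ≠ x) := by
  induction S with
  | nil => simp [pvPairsK]
  | cons y S' ih =>
    by_cases hy : y = x
    · subst hy
      rw [List.filter_cons_of_neg (by simp)]
      rw [ih, pvPairsK, List.filter_append]
      have : (S'.map (fun z => pvKey y z)).filter (fun q => q.1 ≠ y ∧ q.2 ≠ y) = [] := by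
        apply List.filter_eq_nil_iff.mpr
        intro q hq
        simp only [List.mem_map] at hq
        obtain ⟨z, _, rfl⟩ := hq
        rcases pvKey_cases y z with h | h <;> simp [h]
      rw [this, List.nil_append]
    · rw [List.filter_cons_of_pos (by simpa using hy)]
      rw [pvPairsK, pvPairsK, List.filter_append, ih]
      congr 1
      rw [List.filter_map]
      congr 1
      apply List.filter_congr
      intro z hz
      simp only [Function.comp_apply]
      rcases pvKey_cases y z with h | h <;>
        · rw [h]
          by_cases hzx : z = x <;> simp [hzx, hy]

theorem nodup_pvPairsK {S : List String} (hnd : S.Nodup) : (pvPairsK S).Nodup := by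
  induction S with
  | nil => simp [pvPairsK]
  | cons x S' ih =>
    simp only [List.nodup_cons] at hnd
    rw [pvPairsK]
    apply List.Nodup.append
    · apply List.Nodup.map_on _ hnd.2
      intro a ha b hb hk
      rcases pvKey_inj hk with ⟨_, h⟩ | ⟨_, hax⟩
      · exact h
      · exact absurd (hax ▸ ha) hnd.1
    · exact ih hnd.2
    · intro q hq hq2
      simp only [List.mem_map] at hq
      obtain ⟨z, hz, rfl⟩ := hq
      obtain ⟨a, b, ha, hb, hab, hk⟩ := mem_pvPairsK hnd.2 hq2
      rcases pvKey_inj hk with ⟨h1, _⟩ | ⟨h1, _⟩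
      · exact hnd.1 (h1 ▸ ha)
      · exact hnd.1 (h1 ▸ hb)

theorem pvFirsts_pvPairsA (l : List String) :
    pvFirsts (pvPairsA l) = pvPairsK (pvFirsts l) := by
  induction l with
  | nil => simp [pvPairsA, pvPairsK, pvFirsts]
  | cons x xs ih =>
    rw [pvPairsA, pvFirsts_append, ih]
    have hmap : pvFirsts ((xs.filter (fun y => x ≠ y)).map (fun y => pvKey x y)) =
        ((pvFirsts xs).filter (fun y => y ≠ x)).map (fun y => pvKey x y) := by
      rw [pvFirsts_map]
      · rw [pvFirsts_filter]
        congr 1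
        apply List.filter_congr
        intro y _
        simp [ne_comm]
      · intro a ha b hb hk
        simp only [List.mem_filter, decide_eq_true_eq] at ha hb
        rcases pvKey_inj hk with ⟨_, h⟩ | ⟨_, h2⟩
        · exact h
        · exact absurd h2 (fun h => ha.2 h.symm)
    rw [hmap]
    show _ = pvPairsK (x :: (pvFirsts xs).filter (fun y => y ≠ x))
    rw [pvPairsK]
    congr 1
    rw [pvPairsK_filter]
    apply List.filter_congr
    intro q hq
    obtain ⟨a, b, ha, hb, hab, rfl⟩ := mem_pvPairsK (nodup_pvFirsts xs) hq
    have hax : a ∈ xs := mem_pvFirsts.mp ha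
    have hbx : b ∈ xs := mem_pvFirsts.mp hb
    have hiff : pvKey a b ∈ (xs.filter (fun y => x ≠ y)).map (fun y => pvKey x y) ↔
        (a = x ∨ b = x) := by
      constructor
      · intro hmem
        simp only [List.mem_map, List.mem_filter, decide_eq_true_eq] at hmem
        obtain ⟨y, ⟨_, _⟩, hk⟩ := hmem
        rcases pvKey_inj hk.symm with ⟨h1, _⟩ | ⟨_, h2⟩
        · exact Or.inl h1
        · exact Or.inr h2
      · rintro (rfl | rfl)
        · simp only [List.mem_map, List.mem_filter, decide_eq_true_eq]
          exact ⟨b, ⟨hbx, hab⟩, rfl⟩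
        · simp only [List.mem_map, List.mem_filter, decide_eq_true_eq]
          exact ⟨a, ⟨hax, Ne.symm hab⟩, (pvKey_comm _ _).symm⟩
    have hcomp : ((pvKey a b).1 ≠ x ∧ (pvKey a b).2 ≠ x) ↔ ¬(a = x ∨ b = x) := by
      rcases pvKey_cases a b with h | h <;> rw [h] <;> push_neg <;> tauto
    simp only [decide_eq_decide]
    rw [hcomp]
    exact not_congr hiff

-- applying a sequence of defaultdict-appends
def pvApply (c : String) (out : PySem.Dict (String × String) (List String))
    (ks : List (String × String)) : PySem.Dict (String × String) (List String) :=
  ks.foldl (fun o k => o.modify k [] (· ++ [c])) out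

theorem pvModify_modify (d : PySem.Dict (String × String) (List String))
    (k : String × String) (f g : List String → List String) :
    (d.modify k [] f).modify k [] g = d.modify k [] (fun v => g (f v)) := by
  show (d.insert k (f (d.getD k []))).insert k
      (g ((d.insert k (f (d.getD k []))).getD k [])) = d.insert k (g (f (d.getD k [])))
  rw [PySem.Dict.getD_insert_self, PySem.Dict.insert_insert_self]

theorem pvApply_nodup (c : String) (out : PySem.Dict (String × String) (List String))
    (ks : List (String × String)) (h : out.keys.Nodup) : (pvApply c out ks).keys.Nodup := by
  induction ks generalizing out with
  | nil => exact h
  | cons k ks ih => exact ih _ (PySem.Dict.nodup_keys_insert _ _ _ h)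

theorem pvFilter_conj (out : PySem.Dict (String × String) (List String)) (k : String × String)
    (c : String) (F : List (String × String)) :
    F.filter (fun j => !(out.modify k [] (· ++ [c])).contains j) =
      (F.filter (fun y => y ≠ k)).filter (fun j => !out.contains j) := by
  rw [List.filter_filter]
  apply List.filter_congr
  intro j _
  rw [show (out.modify k [] (· ++ [c])).contains j = (j == k || out.contains j) from
    PySem.Dict.contains_insert _ _ _ _]
  by_cases hj : j = k <;> by_cases ho : out.contains j <;> simp [hj, ho]

theorem pvApply_nf (c : String) (ks : List (String × String))
    (out : PySem.Dict (String × String) (List String)) (hnd : out.keys.Nodup) :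
    pvApply c out ks = PySem.Dict.mk
      (out.items.map (fun p => (p.1, p.2 ++ List.replicate (ks.count p.1) c))
        ++ ((pvFirsts ks).filter (fun k => !out.contains k)).map
              (fun k => (k, List.replicate (ks.count k) c))) := by
  induction ks generalizing out with
  | nil =>
    apply PySem.Dict.ext
    show out.items = _
    simp [pvFirsts]
  | cons k ks ih =>
    show pvApply c (out.modify k [] (· ++ [c])) ks = _
    have hout' : (out.modify k [] (· ++ [c])).keys.Nodup :=
      PySem.Dict.nodup_keys_insert _ _ _ hnd
    rw [ih _ hout']
    apply PySem.Dict.ext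
    show (out.modify k [] (· ++ [c])).items.map _ ++
        ((pvFirsts ks).filter (fun j => !(out.modify k [] (· ++ [c])).contains j)).map _ =
      out.items.map _ ++ ((pvFirsts (k :: ks)).filter (fun j => !out.contains j)).map _
    rw [pvFilter_conj,
      show pvFirsts (k :: ks) = k :: (pvFirsts ks).filter (fun y => y ≠ k) from rfl]
    by_cases hc : out.contains k
    · have hitems : (out.modify k [] (· ++ [c])).items =
          out.items.map (fun p => if p.1 == k then (k, out.getD k [] ++ [c]) else p) := by
        rw [show (out.modify k [] (· ++ [c])).items =
            (out.insert k (out.getD k [] ++ [c])).items from rfl,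
          PySem.Dict.items_insert, if_pos hc]
      rw [hitems, List.map_map, List.filter_cons_of_neg (by simp [hc])]
      congr 1
      · apply List.map_congr_left
        intro p hp
        by_cases hpk : p.1 = k
        · have hgd : out.getD p.1 [] = p.2 := by
            apply PySem.Dict.getD_of_mem_items out _ hnd
            exact (Prod.mk.eta (p := p)) ▸ hp
          simp only [Function.comp_apply, hpk, beq_self_eq_true, if_pos]
          rw [← hpk, hgd, List.count_cons_self]
          simp [List.replicate_succ]
        · have hne : (p.1 == k) = false := by simp [hpk]
          simp only [Function.comp_apply, hne, Bool.false_eq_true, if_false]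
          rw [List.count_cons_of_ne (show k ≠ p.1 from fun h => hpk h.symm)]
      · apply List.map_congr_left
        intro j hj
        have hjk : j ≠ k := by
          have := (List.mem_filter.mp (List.mem_filter.mp hj).1).2
          simpa using this
        rw [List.count_cons_of_ne (Ne.symm hjk)]
    · have hitems : (out.modify k [] (· ++ [c])).items = out.items ++ [(k, [] ++ [c])] := by
        rw [show (out.modify k [] (· ++ [c])).items =
            (out.insert k (out.getD k [] ++ [c])).items from rfl,
          PySem.Dict.items_insert, if_neg (by simp [hc]),
          PySem.Dict.getD_of_not_contains _ _ (by simp [hc])]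
      have hknotin : ∀ p ∈ out.items, p.1 ≠ k := by
        intro p hp hpk
        have hkmem : k ∈ out.keys := hpk ▸ PySem.Dict.mem_keys_of_mem_items out hp
        have hcontra := (PySem.Dict.contains_iff_mem_keys out k).mpr hkmem
        rw [hcontra] at hc
        exact hc rfl
      rw [hitems, List.map_append, List.filter_cons_of_pos (by simp [hc]), List.map_cons,
        List.append_assoc]
      congr 1
      · apply List.map_congr_left
        intro p hp
        rw [List.count_cons_of_ne (Ne.symm (hknotin p hp))]
      · simp only [List.map_nil, List.nil_append, List.map_cons]
        refine List.cons_eq_cons.mpr ⟨?_, ?_⟩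
        · show (k, ([] ++ [c]) ++ List.replicate (List.count k ks) c) = _
          rw [List.count_cons_self, List.nil_append]
          simp [List.replicate_succ]
        · apply List.map_congr_left
          intro j hj
          have hjk : j ≠ k := by
            have := (List.mem_filter.mp (List.mem_filter.mp hj).1).2
            simpa using this
          rw [List.count_cons_of_ne (Ne.symm hjk)]

theorem pvApply_congr (c : String) (ks1 ks2 : List (String × String))
    (out : PySem.Dict (String × String) (List String)) (hnd : out.keys.Nodup)
    (hcount : ∀ q, ks1.count q = ks2.count q) (hfirsts : pvFirsts ks1 = pvFirsts ks2) :
    pvApply c out ks1 = pvApply c out ks2 := by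
  rw [pvApply_nf c ks1 out hnd, pvApply_nf c ks2 out hnd, hfirsts]
  congr 1
  congr 1
  · apply List.map_congr_left
    intro p _
    rw [hcount]
  · apply List.map_congr_left
    intro j _
    rw [hcount]

-- B's loop as an op-list application
def pvMults : List (String × Int) → List ((String × String) × Int)
  | [] => []
  | (s1, c1) :: rest => rest.map (fun q => (pvKey s1 q.1, c1 * q.2)) ++ pvMults rest

def pvFlatten (ms : List ((String × String) × Int)) : List (String × String) :=
  ms.flatMap (fun km => List.replicate km.2.toNat km.1)

theorem pvPairLoop_eq_applyM (ctx : String) (pl : List (String × Int))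
    (out : PySem.Dict (String × String) (List String)) :
    pvPairLoop ctx out pl =
      (pvMults pl).foldl
        (fun o km => o.modify km.1 [] (· ++ List.replicate km.2.toNat ctx)) out := by
  induction pl generalizing out with
  | nil => rfl
  | cons h rest ih =>
    obtain ⟨s1, c1⟩ := h
    show pvPairLoop ctx
        (rest.foldl (fun out q =>
          out.modify (pvKey s1 q.1) [] (· ++ List.replicate (c1 * q.2).toNat ctx)) out) rest = _
    rw [ih, pvMults, List.foldl_append, List.foldl_map]

theorem pvApply_replicate (c : String) (k : String × String) (m : Nat) (hm : 1 ≤ m)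
    (out : PySem.Dict (String × String) (List String)) :
    pvApply c out (List.replicate m k) = out.modify k [] (· ++ List.replicate m c) := by
  induction m generalizing out with
  | zero => omega
  | succ n ih =>
    rcases Nat.eq_zero_or_pos n with rfl | hn
    · rfl
    · rw [List.replicate_succ]
      show pvApply c (out.modify k [] (· ++ [c])) (List.replicate n k) = _
      rw [ih hn, pvModify_modify]
      exact congrArg _ (funext fun v => by simp [List.replicate_succ])

theorem pvApplyM_eq_apply (c : String) (ms : List ((String × String) × Int))
    (hpos : ∀ km ∈ ms, 1 ≤ km.2)
    (out : PySem.Dict (String × String) (List String)) :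
    ms.foldl (fun o km => o.modify km.1 [] (· ++ List.replicate km.2.toNat c)) out =
      pvApply c out (pvFlatten ms) := by
  induction ms generalizing out with
  | nil => rfl
  | cons km ms ih =>
    have hm : 1 ≤ km.2.toNat := by
      have := hpos km (by simp)
      omega
    show ms.foldl _ (out.modify km.1 [] (· ++ List.replicate km.2.toNat c)) = _
    rw [ih (fun x hx => hpos x (by simp [hx])),
      show pvFlatten (km :: ms) = List.replicate km.2.toNat km.1 ++ pvFlatten ms from rfl]
    unfold pvApply
    rw [List.foldl_append]
    congr 1
    exact (pvApply_replicate c km.1 km.2.toNat hm out).symm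

-- counting and dedup facts for B's op list over a nodup split list S with counts cnt
theorem pvMults_keys (S : List String) (cnt : String → Int) :
    (pvMults (S.map (fun k => (k, cnt k)))).map (·.1) = pvPairsK S := by
  induction S with
  | nil => rfl
  | cons x S' ih =>
    show ((S'.map (fun k => (k, cnt k))).map
        (fun q => (pvKey x q.1, cnt x * q.2)) ++ _).map (·.1) = _
    rw [List.map_append, List.map_map, List.map_map, ih]
    rfl

theorem mem_pvMults {km : (String × String) × Int} {S : List String} {cnt : String → Int}
    (h : km ∈ pvMults (S.map (fun k => (k, cnt k)))) :
    ∃ u v, u ∈ S ∧ v ∈ S ∧ km = (pvKey u v, cnt u * cnt v) := by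
  induction S with
  | nil => simp [pvMults] at h
  | cons x S' ih =>
    rw [show (x :: S').map (fun k => (k, cnt k)) = (x, cnt x) :: S'.map (fun k => (k, cnt k))
      from rfl, pvMults] at h
    rcases List.mem_append.mp h with h1 | h2
    · rw [show (S'.map (fun k => (k, cnt k))).map (fun q => (pvKey x q.1, cnt x * q.2))
          = S'.map (fun y => (pvKey x y, cnt x * cnt y)) by rw [List.map_map]; rfl] at h1
      obtain ⟨v, hv, rfl⟩ := List.mem_map.mp h1
      exact ⟨x, v, by simp, by simp [hv], rfl⟩
    · obtain ⟨u, v, hu, hv, rfl⟩ := ih h2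
      exact ⟨u, v, by simp [hu], by simp [hv], rfl⟩

theorem pvFirsts_replicate {α : Type} [DecidableEq α] (m : Nat) (hm : 1 ≤ m) (k : α) :
    pvFirsts (List.replicate m k) = [k] := by
  induction m with
  | zero => omega
  | succ n ih =>
    rw [List.replicate_succ]
    show k :: (pvFirsts (List.replicate n k)).filter (fun y => y ≠ k) = [k]
    rcases Nat.eq_zero_or_pos n with rfl | hn
    · rfl
    · rw [ih hn]
      simp

theorem pvFirsts_pvFlatten (ms : List ((String × String) × Int))
    (hnd : (ms.map (·.1)).Nodup) (hpos : ∀ km ∈ ms, 1 ≤ km.2) :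
    pvFirsts (pvFlatten ms) = ms.map (·.1) := by
  induction ms with
  | nil => rfl
  | cons km ms ih =>
    rw [List.map_cons] at hnd ⊢
    rw [show pvFlatten (km :: ms) = List.replicate km.2.toNat km.1 ++ pvFlatten ms from rfl,
      pvFirsts_append, pvFirsts_replicate _ (by have := hpos km (by simp); omega),
      ih (List.nodup_cons.mp hnd).2 (fun x hx => hpos x (by simp [hx]))]
    rw [show (km.1 :: ms.map (·.1) : List (String × String)) = [km.1] ++ ms.map (·.1) from rfl]
    congr 1
    apply List.filter_eq_self.mpr
    intro j hj
    have hjk : j ≠ km.1 := fun h => (List.nodup_cons.mp hnd).1 (h ▸ hj)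
    simp [List.mem_replicate, hjk]

theorem mem_pvFlatten {q : String × String} {ms : List ((String × String) × Int)}
    (h : q ∈ pvFlatten ms) : q ∈ ms.map (·.1) := by
  simp only [pvFlatten, List.mem_flatMap] at h
  obtain ⟨km, hkm, hmem⟩ := h
  rw [List.eq_of_mem_replicate hmem]
  exact List.mem_map_of_mem hkm

theorem pvCountRepPart (x : String) (cnt : String → Int) {a b : String} (hab : a ≠ b)
    (S' : List String) (hx : x ∉ S') (hnd' : S'.Nodup) :
    (pvFlatten (S'.map (fun y => (pvKey x y, cnt x * cnt y)))).count (pvKey a b) =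
      if x = a ∧ b ∈ S' then (cnt a * cnt b).toNat
      else if x = b ∧ a ∈ S' then (cnt a * cnt b).toNat else 0 := by
  induction S' with
  | nil => simp [pvFlatten]
  | cons y S'' ih =>
    have hxy : x ≠ y := fun h => hx (by simp [h])
    have hxS : x ∉ S'' := fun h => hx (by simp [h])
    have hyS : y ∉ S'' := (List.nodup_cons.mp hnd').1
    rw [List.map_cons,
      show pvFlatten ((pvKey x y, cnt x * cnt y) :: S''.map (fun y => (pvKey x y, cnt x * cnt y)))
        = List.replicate (cnt x * cnt y).toNat (pvKey x y) ++
            pvFlatten (S''.map (fun y => (pvKey x y, cnt x * cnt y))) from rfl,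
      List.count_append, List.count_replicate, ih hxS (List.nodup_cons.mp hnd').2]
    by_cases h1 : x = a
    · subst h1
      by_cases h2 : y = b
      · subst h2
        rw [if_pos (show (pvKey x y == pvKey x y) = true by simp),
          if_neg (fun h : x = x ∧ y ∈ S'' => hyS h.2),
          if_neg (fun h : x = y ∧ x ∈ S'' => hxy h.1),
          if_pos ⟨rfl, by simp⟩]
        simp
      · have hknot : ¬(pvKey x y == pvKey x b) = true := by
          simp only [beq_iff_eq]
          intro hk
          rcases pvKey_inj hk with ⟨_, h⟩ | ⟨h, _⟩
          · exact h2 h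
          · exact hab h
        rw [if_neg hknot]
        have hxb : x ≠ b := hab
        by_cases hbS : b ∈ S''
        · rw [if_pos ⟨rfl, hbS⟩, if_pos ⟨rfl, by simp [hbS]⟩]
          simp
        · rw [if_neg (fun h : x = x ∧ b ∈ S'' => hbS h.2),
            if_neg (fun h : x = b ∧ x ∈ S'' => hxb h.1),
            if_neg (fun h : x = x ∧ b ∈ y :: S'' => by
              rcases List.mem_cons.mp h.2 with h3 | h3
              · exact h2 h3.symm
              · exact hbS h3),
            if_neg (fun h : x = b ∧ x ∈ y :: S'' => hxb h.1)]
    · by_cases h2 : x = b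
      · subst h2
        by_cases h3 : y = a
        · subst h3
          rw [if_pos (show (pvKey x y == pvKey y x) = true by
              simp only [beq_iff_eq]; exact pvKey_comm x y),
            if_neg (fun h : x = y ∧ x ∈ S'' => hxy h.1),
            if_neg (fun h : x = x ∧ y ∈ S'' => hyS h.2),
            if_neg (fun h : x = y ∧ x ∈ y :: S'' => hxy h.1),
            if_pos ⟨rfl, by simp⟩]
          simp [Int.mul_comm]
        · have hknot : ¬(pvKey x y == pvKey a x) = true := by
            simp only [beq_iff_eq]
            intro hk
            rcases pvKey_inj hk with ⟨h4, _⟩ | ⟨_, h5⟩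
            · exact h1 h4
            · exact h3 h5
          rw [if_neg hknot]
          by_cases haS : a ∈ S''
          · rw [if_neg (fun h : x = a ∧ x ∈ S'' => h1 h.1), if_pos ⟨rfl, haS⟩,
              if_neg (fun h : x = a ∧ x ∈ y :: S'' => h1 h.1), if_pos ⟨rfl, by simp [haS]⟩]
            simp
          · rw [if_neg (fun h : x = a ∧ x ∈ S'' => h1 h.1),
              if_neg (fun h : x = x ∧ a ∈ S'' => haS h.2),
              if_neg (fun h : x = a ∧ x ∈ y :: S'' => h1 h.1),
              if_neg (fun h : x = x ∧ a ∈ y :: S'' => by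
                rcases List.mem_cons.mp h.2 with h4 | h4
                · exact h3 h4.symm
                · exact haS h4)]
      · have hknot : ¬(pvKey x y == pvKey a b) = true := by
          simp only [beq_iff_eq]
          intro hk
          rcases pvKey_inj hk with ⟨h4, _⟩ | ⟨h4, _⟩
          · exact h1 h4
          · exact h2 h4
        rw [if_neg hknot,
          if_neg (fun h : x = a ∧ b ∈ S'' => h1 h.1),
          if_neg (fun h : x = b ∧ a ∈ S'' => h2 h.1),
          if_neg (fun h : x = a ∧ b ∈ y :: S'' => h1 h.1),
          if_neg (fun h : x = b ∧ a ∈ y :: S'' => h2 h.1)]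

theorem count_pvFlatten_mults (S : List String) (cnt : String → Int) (hnd : S.Nodup)
    {a b : String} (ha : a ∈ S) (hb : b ∈ S) (hab : a ≠ b) :
    (pvFlatten (pvMults (S.map (fun k => (k, cnt k))))).count (pvKey a b) =
      (cnt a * cnt b).toNat := by
  induction S with
  | nil => simp at ha
  | cons x S' ih =>
    have hxS : x ∉ S' := (List.nodup_cons.mp hnd).1
    rw [show (x :: S').map (fun k => (k, cnt k)) = (x, cnt x) :: S'.map (fun k => (k, cnt k))
      from rfl, pvMults,
      show ((S'.map (fun k => (k, cnt k))).map (fun q => (pvKey x q.1, cnt x * q.2)))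
        = S'.map (fun y => (pvKey x y, cnt x * cnt y)) by rw [List.map_map]; rfl]
    rw [show pvFlatten (S'.map (fun y => (pvKey x y, cnt x * cnt y)) ++
          pvMults (S'.map (fun k => (k, cnt k))))
        = pvFlatten (S'.map (fun y => (pvKey x y, cnt x * cnt y))) ++
          pvFlatten (pvMults (S'.map (fun k => (k, cnt k)))) from List.flatMap_append ..,
      List.count_append,
      pvCountRepPart x cnt hab S' hxS (List.nodup_cons.mp hnd).2]
    have hzero_of_notmem : ∀ u : String, u ∈ ({a, b} : Set String) → u ∉ S' →
        (pvFlatten (pvMults (S'.map (fun k => (k, cnt k))))).count (pvKey a b) = 0 := by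
      intro u hu hnotm
      rw [List.count_eq_zero]
      intro hmem
      have hkeys := mem_pvFlatten hmem
      rw [pvMults_keys] at hkeys
      obtain ⟨p, q, hp, hq, hpq, hk⟩ := mem_pvPairsK (List.nodup_cons.mp hnd).2 hkeys
      rcases hu with rfl | hu
      · rcases pvKey_inj hk with ⟨h3, _⟩ | ⟨h3, _⟩
        · exact hnotm (h3 ▸ hp)
        · exact hnotm (h3 ▸ hq)
      · rcases Set.mem_singleton_iff.mp hu with rfl
        rcases pvKey_inj hk with ⟨_, h4⟩ | ⟨_, h4⟩
        · exact hnotm (h4 ▸ hq)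
        · exact hnotm (h4 ▸ hp)
    by_cases h1 : x = a
    · subst h1
      have hbS : b ∈ S' := by
        rcases List.mem_cons.mp hb with h | h
        · exact absurd h.symm hab
        · exact h
      rw [if_pos ⟨rfl, hbS⟩, hzero_of_notmem x (by simp) hxS]
      simp
    · by_cases h2 : x = b
      · subst h2
        have haS : a ∈ S' := by
          rcases List.mem_cons.mp ha with h | h
          · exact absurd h hab
          · exact h
        rw [if_neg (by simp [h1]), if_pos ⟨rfl, haS⟩, hzero_of_notmem x (by simp) hxS]
        simp
      · have haS : a ∈ S' := by
          rcases List.mem_cons.mp ha with h | h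
          · exact absurd h.symm h1
          · exact h
        have hbS : b ∈ S' := by
          rcases List.mem_cons.mp hb with h | h
          · exact absurd h.symm h2
          · exact h
        rw [if_neg (by simp [h1]), if_neg (by simp [h2]),
          ih (List.nodup_cons.mp hnd).2 haS hbS]
        simp

-- the per-context main lemma: A's pair enumeration = B's count-product loop
theorem pvPerContext (c : String) (l : List String)
    (out : PySem.Dict (String × String) (List String)) (hnd : out.keys.Nodup) :
    pvApply c out (pvPairsA l) = pvPairLoop c out (PySem.Dict.counter l).items := by
  rw [pvPairLoop_eq_applyM, PySem.Dict.items_counter]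
  have hpos : ∀ km ∈ pvMults ((PySem.Set.ofList l).map (fun k => (k, (l.count k : Int)))),
      1 ≤ km.2 := by
    intro km hkm
    obtain ⟨u, v, hu, hv, rfl⟩ := mem_pvMults hkm
    have hu' : 0 < l.count u := List.count_pos_iff.mpr ((PySem.Set.mem_ofList l u).mp hu)
    have hv' : 0 < l.count v := List.count_pos_iff.mpr ((PySem.Set.mem_ofList l v).mp hv)
    have h1 : (1 : Int) ≤ (l.count u : Int) := by exact_mod_cast hu'
    have h2 : (1 : Int) ≤ (l.count v : Int) := by exact_mod_cast hv'
    nlinarith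
  rw [pvApplyM_eq_apply c _ hpos out]
  apply pvApply_congr c _ _ out hnd
  · intro q
    by_cases hq : q ∈ pvPairsA l
    · obtain ⟨a, b, ha, hb, hab, rfl⟩ := mem_pvPairsA hq
      rw [count_pvPairsA l hab,
        count_pvFlatten_mults (PySem.Set.ofList l) _ (PySem.Set.nodup_ofList l)
          ((PySem.Set.mem_ofList l a).mpr ha) ((PySem.Set.mem_ofList l b).mpr hb) hab,
        ← Nat.cast_mul, Int.toNat_natCast]
    · rw [List.count_eq_zero.mpr hq, List.count_eq_zero.mpr]
      intro hmem
      have hkeys := mem_pvFlatten hmem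
      rw [pvMults_keys] at hkeys
      obtain ⟨a, b, ha, hb, hab, rfl⟩ := mem_pvPairsK (PySem.Set.nodup_ofList l) hkeys
      apply hq
      have hpos' : 0 < (pvPairsA l).count (pvKey a b) := by
        rw [count_pvPairsA l hab]
        exact Nat.mul_pos (List.count_pos_iff.mpr ((PySem.Set.mem_ofList l a).mp ha))
          (List.count_pos_iff.mpr ((PySem.Set.mem_ofList l b).mp hb))
      exact List.count_pos_iff.mp hpos'
  · rw [pvFirsts_pvPairsA,
      pvFirsts_pvFlatten _ (by rw [pvMults_keys]; exact nodup_pvPairsK (PySem.Set.nodup_ofList l))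
        hpos,
      pvMults_keys, pvFirsts_eq_ofList]

-- stage 1: the two context indexes correspond
def pvF (p : String × List (String × String × Int)) : String × PySem.Dict String Int :=
  (p.1, PySem.Dict.counter (p.2.map (·.1)))

theorem pvF_keys (d1 : PySem.Dict String (List (String × String × Int))) :
    (PySem.Dict.mk (d1.items.map pvF)).keys = d1.keys := by
  show (d1.items.map pvF).map (·.1) = d1.items.map (·.1)
  rw [List.map_map]
  rfl

theorem pvStep1 (d1 : PySem.Dict String (List (String × String × Int))) (hnd : d1.keys.Nodup)
    (cx s f2 : String) (ln : Int) :
    (PySem.Dict.mk (d1.items.map pvF)).modify cx PySem.Dict.empty (fun m => m.modify s 0 (· + 1)) =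
      PySem.Dict.mk ((d1.modify cx [] (· ++ [(s, f2, ln)])).items.map pvF) := by
  have hcont : (PySem.Dict.mk (d1.items.map pvF)).contains cx = d1.contains cx := by
    rw [PySem.Dict.contains_eq_decide_mem_keys, PySem.Dict.contains_eq_decide_mem_keys, pvF_keys]
  apply PySem.Dict.ext
  show ((PySem.Dict.mk (d1.items.map pvF)).insert cx _).items =
    ((d1.insert cx ((d1.getD cx []) ++ [(s, f2, ln)])).items).map pvF
  rw [PySem.Dict.items_insert, PySem.Dict.items_insert, hcont]
  by_cases hc : d1.contains cx
  · rw [if_pos hc, if_pos hc]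
    have hcx : cx ∈ d1.keys := (PySem.Dict.contains_iff_mem_keys d1 cx).mp hc
    obtain ⟨p, hp, hp1⟩ := List.mem_map.mp (by exact hcx)
    have hpmem : (cx, p.2) ∈ d1.items := by
      rw [← hp1]
      exact (Prod.mk.eta (p := p)) ▸ hp
    have hgd1 : d1.getD cx [] = p.2 := PySem.Dict.getD_of_mem_items d1 hpmem hnd []
    have hmemF : (cx, PySem.Dict.counter (p.2.map (·.1))) ∈ (d1.items.map pvF) := by
      exact List.mem_map_of_mem hpmem
    have hnd2 : (PySem.Dict.mk (d1.items.map pvF)).keys.Nodup := by rw [pvF_keys]; exact hnd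
    have hgd2 : (PySem.Dict.mk (d1.items.map pvF)).getD cx PySem.Dict.empty =
        PySem.Dict.counter (p.2.map (·.1)) :=
      PySem.Dict.getD_of_mem_items _ hmemF hnd2 _
    show (d1.items.map pvF).map _ = (d1.items.map _).map pvF
    rw [List.map_map, List.map_map]
    apply List.map_congr_left
    intro q hq
    by_cases hqc : q.1 = cx
    · have hq2 : q.2 = p.2 := by
        have := PySem.Dict.getD_of_mem_items d1 (show (cx, q.2) ∈ d1.items from by
          rw [← hqc]; exact (Prod.mk.eta (p := q)) ▸ hq) hnd []
        rw [hgd1] at this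
        exact this.symm
      simp only [Function.comp_apply, pvF, hqc, beq_self_eq_true, if_pos]
      rw [hgd2, hgd1]
      show (cx, (PySem.Dict.counter (p.2.map (·.1))).modify s 0 (· + 1)) =
        (cx, PySem.Dict.counter ((p.2 ++ [(s, f2, ln)]).map (·.1)))
      rw [List.map_append]
      show _ = (cx, PySem.Dict.counter (p.2.map (·.1) ++ [s]))
      rw [PySem.Dict.counter_append_singleton]
    · have h1 : (q.1 == cx) = false := by simp [hqc]
      simp only [Function.comp_apply, pvF, h1, Bool.false_eq_true, if_false]
  · rw [if_neg hc, if_neg hc, List.map_append]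
    congr 1
    rw [PySem.Dict.getD_of_not_contains d1 _ (by simpa using hc),
      PySem.Dict.getD_of_not_contains _ _ (by rw [hcont]; simpa using hc)]
    rfl

theorem pvStage1 (evs : List (String × (String × String × Int)))
    (d1 : PySem.Dict String (List (String × String × Int))) (hnd : d1.keys.Nodup) :
    evs.foldl (fun d e => d.modify e.2.1 PySem.Dict.empty (fun c => c.modify e.1 0 (· + 1)))
        (PySem.Dict.mk (d1.items.map pvF)) =
      PySem.Dict.mk
        ((evs.foldl (fun d e => d.modify e.2.1 [] (· ++ [(e.1, e.2.2.1, e.2.2.2)])) d1).items.map pvF) := by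
  induction evs generalizing d1 with
  | nil => rfl
  | cons e evs ih =>
    have hnd' : (d1.modify e.2.1 [] (· ++ [(e.1, e.2.2.1, e.2.2.2)])).keys.Nodup :=
      PySem.Dict.nodup_keys_insert _ _ _ hnd
    show evs.foldl _ ((PySem.Dict.mk (d1.items.map pvF)).modify e.2.1 PySem.Dict.empty _) = _
    rw [pvStep1 d1 hnd e.2.1 e.1 e.2.2.1 e.2.2.2]
    exact ih _ hnd'

theorem pvInner (c s1 : String) (rest' : List (String × String × Int))
    (out : PySem.Dict (String × String) (List String)) :
    rest'.foldl (fun out o2 =>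
        if s1 ≠ o2.1 then out.modify (pvSortedPair s1 o2.1) [] (· ++ [c]) else out) out =
      pvApply c out (((rest'.map (·.1)).filter (fun y => s1 ≠ y)).map (fun y => pvKey s1 y)) := by
  induction rest' generalizing out with
  | nil => rfl
  | cons o2 rest ih =>
    rw [List.foldl_cons, List.map_cons]
    by_cases h : s1 = o2.1
    · rw [if_neg (by simpa using h), List.filter_cons_of_neg (by simpa using h), ih]
    · rw [if_pos (by simpa using h), List.filter_cons_of_pos (by simpa using h), List.map_cons,
        ih, pvSortedPair_eq_pvKey]
      rfl

theorem pvLoopA (c : String) (occs rest : List (String × String × Int)) (j : Nat)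
    (hrest : occs.drop j = rest) (out : PySem.Dict (String × String) (List String)) :
    (PySem.List.enumerate rest (j : Int)).foldl (fun out io =>
        (PySem.List.slice occs (some (io.1 + 1)) none).foldl (fun out o2 =>
          if io.2.1 ≠ o2.1 then
            out.modify (pvSortedPair io.2.1 o2.1) [] (· ++ [c])
          else out) out) out =
      pvApply c out (pvPairsA (rest.map (·.1))) := by
  induction rest generalizing j out with
  | nil => rfl
  | cons o1 rest' ih =>
    rw [show PySem.List.enumerate (o1 :: rest') (j : Int) =
        ((j : Int), o1) :: PySem.List.enumerate rest' ((j : Int) + 1) from rfl,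
      List.foldl_cons]
    have hdrop : occs.drop (j + 1) = rest' := by
      rw [← List.drop_drop, hrest]
      rfl
    have hslice : PySem.List.slice occs (some ((j : Int) + 1)) none = rest' := by
      rw [show ((j : Int) + 1) = ((j + 1 : Nat) : Int) by push_cast; ring,
        PySem.List.slice_from _ (by positivity), Int.toNat_natCast, hdrop]
    rw [hslice, pvInner, show ((j : Int) + 1) = ((j + 1 : Nat) : Int) by push_cast; ring,
      ih (j + 1) hdrop]
    show pvApply c (pvApply c out _) _ = pvApply c out (pvPairsA ((o1 :: rest').map (·.1)))
    rw [show pvPairsA ((o1 :: rest').map (·.1)) =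
        ((rest'.map (·.1)).filter (fun y => o1.1 ≠ y)).map (fun y => pvKey o1.1 y) ++
          pvPairsA (rest'.map (·.1)) from rfl]
    unfold pvApply
    rw [List.foldl_append]

-- fold the two second-phase loops in parallel
theorem pvFold_parallel (L : List (String × List (String × String × Int)))
    (out : PySem.Dict (String × String) (List String)) (hnd : out.keys.Nodup) :
    L.foldl (fun out ci =>
      if 1 < PySem.Set.len (PySem.Set.ofList (ci.2.map (·.1))) then
        (PySem.List.enumerate ci.2).foldl (fun out io =>
          (PySem.List.slice ci.2 (some (io.1 + 1)) none).foldl (fun out o2 =>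
            if io.2.1 ≠ o2.1 then
              out.modify (pvSortedPair io.2.1 o2.1) [] (· ++ [ci.1])
            else out) out) out
      else out) out =
    (L.map pvF).foldl (fun out ci => pvPairLoop ci.1 out ci.2.items) out := by
  induction L generalizing out with
  | nil => rfl
  | cons ci L ih =>
    rw [List.map_cons, List.foldl_cons, List.foldl_cons]
    have hstep :
        (if 1 < PySem.Set.len (PySem.Set.ofList (ci.2.map (·.1))) then
          (PySem.List.enumerate ci.2).foldl (fun out io =>
            (PySem.List.slice ci.2 (some (io.1 + 1)) none).foldl (fun out o2 =>
              if io.2.1 ≠ o2.1 then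
                out.modify (pvSortedPair io.2.1 o2.1) [] (· ++ [ci.1])
              else out) out) out
        else out) = pvPairLoop (pvF ci).1 out (pvF ci).2.items := by
      have hloop := pvLoopA ci.1 ci.2 ci.2 0 rfl out
      have hper := pvPerContext ci.1 (ci.2.map (·.1)) out hnd
      by_cases hg : 1 < PySem.Set.len (PySem.Set.ofList (ci.2.map (·.1)))
      · rw [if_pos hg]
        exact (hloop.trans hper : _)
      · rw [if_neg hg]
        have hlen : (PySem.Set.ofList (ci.2.map (·.1))).length ≤ 1 := by
          have : ((PySem.Set.ofList (ci.2.map (·.1))).length : Int) ≤ 1 := by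
            exact not_lt.mp hg
          exact_mod_cast this
        show out = pvPairLoop ci.1 out (PySem.Dict.counter (ci.2.map (·.1))).items
        rw [PySem.Dict.items_counter]
        rcases hS : PySem.Set.ofList (ci.2.map (·.1)) with _ | ⟨x, t⟩
        · rw [hS]
          rfl
        · rcases ht : t with _ | ⟨y, t'⟩
          · subst ht
            rw [hS]
            rfl
          · subst ht
            rw [hS] at hlen
            simp at hlen
    rw [hstep]
    have hnd' : (pvPairLoop (pvF ci).1 out (pvF ci).2.items).keys.Nodup := by
      rw [← hstep]
      by_cases hg : 1 < PySem.Set.len (PySem.Set.ofList (ci.2.map (·.1)))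
      · rw [if_pos hg]
        have hloop0 := pvLoopA ci.1 ci.2 ci.2 0 rfl out
        simp only [Nat.cast_zero] at hloop0
        rw [hloop0]
        exact pvApply_nodup _ _ _ hnd
      · rw [if_neg hg]
        exact hnd
    exact ih _ hnd'

-- ===== VERDICT (by name: the statement is the Claim_ definition above) =====
-- helper names for the two ports' internal dictionaries (proof-only)
def pvEvents (splits : List (String × List (String × String × Int))) :
    List (String × (String × String × Int)) :=
  splits.flatMap (fun p => p.2.map (fun t => (p.1, t)))

theorem pvIdxA_events (splits : List (String × List (String × String × Int))) :
    splits.foldl (fun d p =>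
        p.2.foldl (fun d t => d.modify t.1 [] (· ++ [(p.1, t.2.1, t.2.2)])) d) PySem.Dict.empty =
      (pvEvents splits).foldl
        (fun d e => d.modify e.2.1 [] (· ++ [(e.1, e.2.2.1, e.2.2.2)])) PySem.Dict.empty := by
  rw [pvEvents, List.foldl_flatMap]
  simp only [List.foldl_map]

theorem pvIdxB_events (splits : List (String × List (String × String × Int))) :
    splits.foldl (fun d p =>
        p.2.foldl (fun d t =>
          d.modify t.1 PySem.Dict.empty (fun c => c.modify p.1 0 (· + 1))) d)
        (PySem.Dict.empty : PySem.Dict String (PySem.Dict String Int)) =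
      (pvEvents splits).foldl
        (fun d e => d.modify e.2.1 PySem.Dict.empty (fun c => c.modify e.1 0 (· + 1)))
        PySem.Dict.empty := by
  rw [pvEvents, List.foldl_flatMap]
  simp only [List.foldl_map]

-- ===== VERDICT (by name: the statement is the Claim_ definition above) =====
theorem check_exact_duplicates_spec : Claim_equal_check_exact_duplicates := by
  intro splits _
  show check_exact_duplicates splits = check_exact_duplicates_alt splits
  have hB : splits.foldl (fun d p =>
      p.2.foldl (fun d t =>
        d.modify t.1 PySem.Dict.empty (fun c => c.modify p.1 0 (· + 1))) d)
      (PySem.Dict.empty : PySem.Dict String (PySem.Dict String Int)) =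
      PySem.Dict.mk ((splits.foldl (fun d p =>
        p.2.foldl (fun d t => d.modify t.1 [] (· ++ [(p.1, t.2.1, t.2.2)])) d)
          PySem.Dict.empty).items.map pvF) :=
    (pvIdxB_events splits).trans
      ((pvStage1 (pvEvents splits) PySem.Dict.empty (by simp [PySem.Dict.keys_empty])).trans
        (congrArg (fun d => PySem.Dict.mk (d.items.map pvF)) (pvIdxA_events splits).symm))
  show ((splits.foldl (fun d p =>
      p.2.foldl (fun d t => d.modify t.1 [] (· ++ [(p.1, t.2.1, t.2.2)])) d)
        PySem.Dict.empty).items.foldl (fun out ci =>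
      if 1 < PySem.Set.len (PySem.Set.ofList (ci.2.map (·.1))) then
        (PySem.List.enumerate ci.2).foldl (fun out io =>
          (PySem.List.slice ci.2 (some (io.1 + 1)) none).foldl (fun out o2 =>
            if io.2.1 ≠ o2.1 then
              out.modify (pvSortedPair io.2.1 o2.1) [] (· ++ [ci.1])
            else out) out) out
      else out) PySem.Dict.empty).items.map (fun kv => (kv.1.1, kv.1.2, kv.2)) =
    ((splits.foldl (fun d p =>
      p.2.foldl (fun d t =>
        d.modify t.1 PySem.Dict.empty (fun c => c.modify p.1 0 (· + 1))) d)
        (PySem.Dict.empty : PySem.Dict String (PySem.Dict String Int))).items.foldl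
      (fun out ci => pvPairLoop ci.1 out ci.2.items) PySem.Dict.empty).items.map
        (fun kv => (kv.1.1, kv.1.2, kv.2))
  refine congrArg _ (congrArg PySem.Dict.items ?_)
  refine (pvFold_parallel _ _ (by simp [PySem.Dict.keys_empty])).trans ?_
  exact congrArg (fun I => I.items.foldl
    (fun out ci => pvPairLoop ci.1 out ci.2.items) PySem.Dict.empty) hB.symm
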